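-- pv_equiv track=rewrite | github.com/Lucian292/AI-Homework | Tema 4/main.py | best_move_for_B
-- ===== SOURCE A (Python) =====
-- def best_move_for_B(board, available_combinations):
--     magic_square = [
--         [2, 7, 6],
--         [9, 5, 1],
--         [4, 3, 8]
--     ]
--
--     max_intersection_count = 0
--     best_move = None
--
--     for num in range(1, 10):
--         if num in board:
--             continue
--
--         intersection_count = 0
--         for combination in available_combinations:
--             if num in combination:
--                 intersection_count += 1
--
--         if intersection_count > max_intersection_count:
--             max_intersection_count = intersection_count
--             best_move = num
--
--     return best_move
-- ===== SOURCE B (Python) =====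
-- def best_move_for_B(board, available_combinations):
--     # one pass: how many combinations contain each number
--     freq = {}
--     for combination in available_combinations:
--         for num in set(combination):
--             freq[num] = freq.get(num, 0) + 1
--     candidates = [num for num in range(1, 10)
--                   if num not in board and freq.get(num, 0) > 0]
--     # highest frequency wins, ties go to the smallest number
--     return max(candidates, key=lambda num: (freq.get(num, 0), -num), default=None)
-- ===== Notes on version B (the rewrite author's own statement) =====
-- stated objective: simpler
-- what changed: B replaces the nested scan (for each of 1..9 re-scan all combinations) by a frequency table built in one pass over the combinations, then picks the best candidate with a single keyed max (key = (count, -num)) instead of A's running-max loop; the dead magic_square is dropped.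
import Mathlib
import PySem

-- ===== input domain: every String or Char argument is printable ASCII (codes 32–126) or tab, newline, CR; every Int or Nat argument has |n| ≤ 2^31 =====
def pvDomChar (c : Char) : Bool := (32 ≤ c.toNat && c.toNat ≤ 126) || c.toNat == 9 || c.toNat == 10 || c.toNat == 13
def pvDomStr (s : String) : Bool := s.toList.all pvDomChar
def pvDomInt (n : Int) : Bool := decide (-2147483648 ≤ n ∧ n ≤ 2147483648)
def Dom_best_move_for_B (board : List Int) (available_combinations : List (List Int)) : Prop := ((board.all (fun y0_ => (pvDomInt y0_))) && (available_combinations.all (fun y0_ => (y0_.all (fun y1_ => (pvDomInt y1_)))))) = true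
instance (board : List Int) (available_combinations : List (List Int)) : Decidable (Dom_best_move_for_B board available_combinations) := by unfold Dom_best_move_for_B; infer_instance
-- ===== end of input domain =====

-- B builds the per-number frequency table in one pass and picks the winner with a single
-- keyed max (key = (count, -num)), instead of A's nested re-scan with a running max; simpler.

-- ===== PORT A =====
def best_move_for_B (board : List Int) (available_combinations : List (List Int)) : Option Int :=
  let _magic_square : List (List Int) := [[2,7,6],[9,5,1],[4,3,8]]
  let st :=
    (PySem.List.pyRange 1 10).foldl
      (fun (st : Int × Option Int) num =>
        if num ∈ board then st
        else
          let intersection_count :=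
            available_combinations.foldl
              (fun acc combination => if num ∈ combination then acc + 1 else acc) (0 : Int)
          if intersection_count > st.1 then (intersection_count, some num) else st)
      ((0 : Int), (none : Option Int))
  st.2

-- ===== PORT B =====
def best_move_for_B_alt (board : List Int) (available_combinations : List (List Int)) : Option Int :=
  let freq : PySem.Dict Int Int :=
    available_combinations.foldl
      (fun d combination =>
        (PySem.Set.ofList combination).foldl (fun d num => d.modify num 0 (· + 1)) d)
      PySem.Dict.empty
  let candidates :=
    (PySem.List.pyRange 1 10).filter
      (fun num => decide (num ∉ board) && decide (freq.getD num 0 > 0))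
  PySem.List.max2? candidates (fun num => freq.getD num 0) (fun num => -num)

-- ===== PRECONDITION & SPEC =====
def Spec_best_move_for_B (board : List Int) (available_combinations : List (List Int)) (out : Option Int) : Prop := out = best_move_for_B_alt board available_combinations
instance (board : List Int) (available_combinations : List (List Int)) (out : Option Int) : Decidable (Spec_best_move_for_B board available_combinations out) := by unfold Spec_best_move_for_B; infer_instance

-- ===== CLAIM (what is proved, stated in full; the proofs are below) =====
def Claim_equal_best_move_for_B : Prop := ∀ (board : List Int) (available_combinations : List (List Int)), Dom_best_move_for_B board available_combinations → Spec_best_move_for_B board available_combinations (best_move_for_B board available_combinations)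

-- ===== LEMMAS AND PROOFS =====

-- The frequency table's lookup is exactly "number of combinations containing v".
theorem pv_freq_getD (combs : List (List Int)) (d : PySem.Dict Int Int) (v : Int) :
    (combs.foldl
      (fun d combination =>
        (PySem.Set.ofList combination).foldl (fun d num => d.modify num 0 (· + 1)) d)
      d).getD v 0
    = d.getD v 0 + (combs.countP (fun c => decide (v ∈ c)) : Int) := by
  induction combs generalizing d with
  | nil => simp
  | cons c cs ih =>
    simp only [List.foldl_cons, ih, PySem.Dict.getD_foldl_modify_add_one, List.countP_cons]
    by_cases hv : v ∈ c
    · have h1 : (PySem.Set.ofList c).count v = 1 :=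
        List.count_eq_one_of_mem (PySem.Set.nodup_ofList c) ((PySem.Set.mem_ofList c v).mpr hv)
      simp [hv]
      ring
    · have h0 : (PySem.Set.ofList c).count v = 0 := by
        rw [List.count_eq_zero]
        simpa [PySem.Set.mem_ofList] using hv
      simp [h0, hv]

-- the fold step of PySem.List.max2? with keys (c, -·), as a named function
def pvStep (c : Int → Int) (acc : Option Int) (x : Int) : Option Int :=
  match acc with
  | none => some x
  | some mm =>
    if (decide (c mm < c x) || !decide (c x < c mm) && decide (-mm < -x)) = true
    then some x else some mm

theorem pv_max2_eq (c : Int → Int) (l : List Int) :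
    PySem.List.max2? l c (fun n => -n) = l.foldl (pvStep c) none := by
  unfold PySem.List.max2?
  congr 1
  funext acc x
  cases acc <;> rfl

-- A's running-max scan over a strictly increasing candidate list equals the
-- keyed-max fold (key = (count, -num)) over the filtered candidates.
theorem pv_scan_eq (board : List Int) (c : Int → Int) :
    ∀ (ns : List Int) (m : Int) (b : Option Int),
      ns.Pairwise (· < ·) →
      (b = none → m = 0) →
      (∀ v, b = some v → m = c v ∧ 0 < m ∧ ∀ n ∈ ns, v < n) →
      (ns.foldl
        (fun (st : Int × Option Int) num =>
          if num ∈ board then st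
          else if c num > st.1 then (c num, some num) else st)
        (m, b)).2
      = (ns.filter (fun num => decide (num ∉ board) && decide (c num > 0))).foldl
          (pvStep c) b := by
  intro ns
  induction ns with
  | nil => intro m b _ _ _; simp
  | cons n ns ih =>
    intro m b hpw hnone hsome
    have hpw' : ns.Pairwise (· < ·) := (List.pairwise_cons.mp hpw).2
    have hlt : ∀ x ∈ ns, n < x := (List.pairwise_cons.mp hpw).1
    by_cases hb : n ∈ board
    · simp only [List.foldl_cons, List.filter_cons, hb]
      exact ih m b hpw' hnone (fun v hv => by
        obtain ⟨h1, h2, h3⟩ := hsome v hv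
        exact ⟨h1, h2, fun x hx => h3 x (List.mem_cons_of_mem _ hx)⟩)
    · simp only [List.foldl_cons, List.filter_cons, if_neg hb]
      cases b with
      | none =>
        have hm : m = 0 := hnone rfl
        subst hm
        by_cases hc : c n > 0
        · have hkeep : (decide (n ∉ board) && decide (c n > 0)) = true := by simp [hb, hc]
          simp only [hkeep, if_true, if_pos hc, List.foldl_cons]
          exact ih (c n) (some n) hpw'
            (by intro h; cases h)
            (by intro v hv; cases hv; exact ⟨rfl, hc, hlt⟩)
        · have hdrop : (decide (n ∉ board) && decide (c n > 0)) = false := by simp [hb, hc]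
          simp only [hdrop, Bool.false_eq_true, if_neg hc]
          exact ih 0 none hpw' (fun _ => rfl) (fun v hv => by cases hv)
      | some v =>
        obtain ⟨hm, hpos, hvlt⟩ := hsome v rfl
        have hvn : v < n := hvlt n (List.mem_cons_self)
        by_cases hc : c n > m
        · have hc0 : c n > 0 := lt_trans hpos hc
          have hkeep : (decide (n ∉ board) && decide (c n > 0)) = true := by simp [hb, hc0]
          simp only [hkeep, if_true, if_pos hc, List.foldl_cons]
          have hstep : pvStep c (some v) n = some n := by
            have : c v < c n := hm ▸ hc
            simp [pvStep, this]
          simp only [hstep]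
          exact ih (c n) (some n) hpw'
            (by intro h; cases h)
            (by intro w hw; cases hw; exact ⟨rfl, hc0, hlt⟩)
        · have hle : c n ≤ c v := by rw [← hm]; omega
          by_cases hc0 : c n > 0
          · have hkeep : (decide (n ∉ board) && decide (c n > 0)) = true := by simp [hb, hc0]
            simp only [hkeep, if_true, if_neg hc, List.foldl_cons]
            have hstep : pvStep c (some v) n = some v := by
              have h1 : ¬ c v < c n := not_lt.mpr hle
              have h2 : ¬ (-v < -n) := by omega
              simp [pvStep, h1, h2]
            simp only [hstep]
            exact ih m (some v) hpw' (by intro h; cases h)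
              (by intro w hw; cases hw;
                  exact ⟨hm, hpos, fun x hx => hvlt x (List.mem_cons_of_mem _ hx)⟩)
          · have hdrop : (decide (n ∉ board) && decide (c n > 0)) = false := by simp [hb, hc0]
            simp only [hdrop, Bool.false_eq_true, if_neg hc]
            exact ih m (some v) hpw' (by intro h; cases h)
              (by intro w hw; cases hw;
                  exact ⟨hm, hpos, fun x hx => hvlt x (List.mem_cons_of_mem _ hx)⟩)

-- ===== VERDICT (by name: the statement is the Claim_ definition above) =====
theorem best_move_for_B_spec : Claim_equal_best_move_for_B := by
  intro board combs _
  unfold Spec_best_move_for_B best_move_for_B best_move_for_B_alt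
  -- name the count function
  set c : Int → Int := fun num => ((combs.countP (fun comb => decide (num ∈ comb)) : Nat) : Int) with hc
  have hfreq : ∀ num,
      (combs.foldl
        (fun d combination =>
          (PySem.Set.ofList combination).foldl (fun d num => d.modify num 0 (· + 1)) d)
        PySem.Dict.empty).getD num 0 = c num := by
    intro num
    rw [pv_freq_getD]
    simp [hc]
  -- A's inner loop is the count
  have hinner : ∀ num,
      combs.foldl (fun acc combination => if num ∈ combination then acc + 1 else acc) (0 : Int)
      = c num := by
    intro num
    have := PySem.List.foldl_count_if (fun combination => decide (num ∈ combination)) combs 0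
    simpa [hc] using this
  simp only [hfreq, hinner, pv_max2_eq]
  have hpw : (PySem.List.pyRange 1 10).Pairwise (· < ·) := by decide
  exact (pv_scan_eq board c (PySem.List.pyRange 1 10) 0 none hpw (fun _ => rfl)
    (fun v hv => by cases hv))
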